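-- pv_equiv track=rewrite | github.com/chinese-liliths-throne/GirlLifeLocalization | src/runtime/guard.py | _scan_code_health
-- ===== SOURCE A (Python) =====
-- def _scan_code_health(text: str) -> tuple[str, ...]:
--     issues: list[str] = []
--     index = 0
--     line = 1
--     quote: str | None = None
--     quote_line: int | None = None
--     in_line_comment = False
--     in_block_comment = False
--     block_comment_line: int | None = None
--
--     while index < len(text):
--         char = text[index]
--         next_char = text[index + 1] if index + 1 < len(text) else ""
--
--         if char == "\n":
--             line += 1
--             if in_line_comment:
--                 in_line_comment = False
--             index += 1
--             continue
--
--         if in_line_comment: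
--             index += 1
--             continue
--
--         if in_block_comment:
--             if char == "!" and next_char == "}":
--                 in_block_comment = False
--                 block_comment_line = None
--                 index += 2
--                 continue
--             index += 1
--             continue
--
--         if quote:
--             if char == quote:
--                 if next_char == quote:
--                     index += 2
--                     continue
--                 quote = None
--                 quote_line = None
--             index += 1
--             continue
--
--         if char == "!" and next_char == "!":
--             in_line_comment = True
--             index += 2
--             continue
--
--         if char == "{" and next_char == "!":
--             in_block_comment = True
--             block_comment_line = line
--             index += 2
--             continue
--
--         if char in ("'", '"'):
--             quote = char
--             quote_line = line
--             index += 1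
--             continue
--
--         index += 1
--
--     if quote and quote_line is not None:
--         issues.append(f"存在未闭合字符串，起始行 {quote_line}，引号 {quote}")
--     if in_block_comment and block_comment_line is not None:
--         issues.append(f"存在未闭合块注释，起始行 {block_comment_line}")
--     return tuple(issues)
-- ===== SOURCE B (Python) =====
-- def _scan_code_health(text: str) -> tuple[str, ...]:
--     issues: list[str] = []
--     i = 0
--     line = 1
--     quote = None
--     quote_line = None
--     n = len(text)
--     while i < n:
--         c = text[i]
--         if c == "\n":
--             line += 1
--             i += 1
--         elif quote is not None:
--             if c == quote and text[i + 1:i + 2] == quote: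
--                 i += 2
--             elif c == quote:
--                 quote = None
--                 quote_line = None
--                 i += 1
--             else:
--                 i += 1
--         elif text.startswith("!!", i):
--             # line comment: jump straight to the next newline (or end of text)
--             j = text.find("\n", i + 2)
--             i = n if j < 0 else j
--         elif text.startswith("{!", i):
--             # block comment: jump straight to its closing "!}"
--             j = text.find("!}", i + 2)
--             if j < 0:
--                 issues.append(f"存在未闭合块注释，起始行 {line}")
--                 i = n
--             else:
--                 line += text.count("\n", i + 2, j)
--                 i = j + 2
--         elif c in ("'", '"'):
--             quote = c
--             quote_line = line
--             i += 1
--         else: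
--             i += 1
--     if quote is not None and quote_line is not None:
--         issues.append(f"存在未闭合字符串，起始行 {quote_line}，引号 {quote}")
--     return tuple(issues)
-- ===== Notes on version B (the rewrite author's own statement) =====
-- stated objective: alternative
-- what changed: A steps one character at a time carrying in_line_comment/in_block_comment state flags; B drops both flags and instead skips each comment in a single jump (str.find of the line end resp. of the block-comment terminator), adding the newline count of the skipped region to the line counter.
import Mathlib
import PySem

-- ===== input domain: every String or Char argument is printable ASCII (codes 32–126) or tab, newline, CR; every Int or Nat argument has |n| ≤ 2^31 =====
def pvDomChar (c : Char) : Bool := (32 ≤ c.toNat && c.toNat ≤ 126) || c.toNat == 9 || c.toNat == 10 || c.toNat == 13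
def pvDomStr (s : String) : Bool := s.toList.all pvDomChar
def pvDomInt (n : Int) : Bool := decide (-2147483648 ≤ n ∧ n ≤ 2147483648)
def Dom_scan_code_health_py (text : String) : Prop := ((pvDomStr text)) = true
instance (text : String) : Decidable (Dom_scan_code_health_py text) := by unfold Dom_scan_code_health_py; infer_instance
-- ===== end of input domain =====

-- B's change (header line): A walks one character at a time carrying in_line_comment/in_block_comment flags;
-- B drops both flags and instead jumps over each comment in one step (find the next newline / the closing "!}"),
-- adding the skipped newline count to the line counter — an alternative decomposition, same results.

-- f"存在未闭合字符串，起始行 {quote_line}，引号 {quote}"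
def pvMsgQuote (q : Char) (ql : Int) : String :=
  "存在未闭合字符串，起始行 " ++ PySem.Int.toStr ql ++ "，引号 " ++ String.ofList [q]

-- f"存在未闭合块注释，起始行 {block_comment_line}"
def pvMsgBlock (bl : Int) : String :=
  "存在未闭合块注释，起始行 " ++ PySem.Int.toStr bl

-- ===== PORT A =====
-- final issue list of A ("if quote and quote_line is not None", "if in_block_comment and block_comment_line is not None")
def pvFinA (quote : Option Char) (qline : Option Int) (ibc : Bool) (bline : Option Int) : List String :=
  (match quote, qline with
   | some q, some ql => [pvMsgQuote q ql]
   | _, _ => []) ++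
  (match ibc, bline with
   | true, some bl => [pvMsgBlock bl]
   | _, _ => [])

-- A's while-loop over `index`, rendered as recursion on the remaining suffix of the text;
-- `next_char` (= "" at the end) becomes `rest.head?` (= none at the end).
def pvLoopA (cs : List Char) (line : Int) (quote : Option Char) (qline : Option Int)
    (ilc : Bool) (ibc : Bool) (bline : Option Int) : List String :=
  match cs with
  | [] => pvFinA quote qline ibc bline
  | c :: rest =>
    if c = '\n' then pvLoopA rest (line + 1) quote qline false ibc bline
    else if ilc then pvLoopA rest line quote qline ilc ibc bline
    else if ibc then
      if c = '!' ∧ rest.head? = some '}' then pvLoopA rest.tail line quote qline ilc false none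
      else pvLoopA rest line quote qline ilc ibc bline
    else match quote with
      | some q =>
        if c = q then
          if rest.head? = some q then pvLoopA rest.tail line quote qline ilc ibc bline
          else pvLoopA rest line none none ilc ibc bline
        else pvLoopA rest line quote qline ilc ibc bline
      | none =>
        if c = '!' ∧ rest.head? = some '!' then pvLoopA rest.tail line quote qline true ibc bline
        else if c = '{' ∧ rest.head? = some '!' then pvLoopA rest.tail line quote qline ilc true (some line)
        else if c = '\'' ∨ c = '"' then pvLoopA rest line (some c) (some line) ilc ibc bline
        else pvLoopA rest line quote qline ilc ibc bline
  termination_by cs.length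
  decreasing_by all_goals (simp [List.length_tail]; try omega)

def scan_code_health_py (text : String) : List String :=
  pvLoopA text.toList 1 none none false false none

-- ===== PORT B =====
-- text.find("!}", i+2): scan for the first "!}"; returns (skipped part, suffix after the "!}")
def pvFindBlockEnd (cs : List Char) : Option (List Char × List Char) :=
  match cs with
  | [] => none
  | c :: rest =>
    if c = '!' ∧ rest.head? = some '}' then some ([], rest.tail)
    else (pvFindBlockEnd rest).map (fun p => (c :: p.1, p.2))

-- termination helper for pvLoopB (cited in its decreasing_by)
theorem pvFindBlockEnd_len : ∀ (cs pre suf : List Char), pvFindBlockEnd cs = some (pre, suf) → suf.length ≤ cs.length := by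
  intro cs
  induction cs with
  | nil => intro pre suf h; simp [pvFindBlockEnd] at h
  | cons c rest ih =>
    intro pre suf h
    simp only [pvFindBlockEnd] at h
    split_ifs at h with hc
    · cases h
      simp [List.length_tail]
      omega
    · cases hfe : pvFindBlockEnd rest with
      | none => rw [hfe] at h; simp at h
      | some p =>
        rw [hfe] at h; simp at h
        have := ih p.1 p.2 (by rw [hfe])
        obtain ⟨hp, hs⟩ := h
        simp [← hs]
        omega

-- final block of B: "if quote is not None and quote_line is not None"
def pvFinB (quote : Option Char) (qline : Option Int) : List String :=
  match quote, qline with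
  | some q, some ql => [pvMsgQuote q ql]
  | _, _ => []

-- B's while-loop: no comment flags; comments are skipped in one jump.
def pvLoopB (cs : List Char) (line : Int) (quote : Option Char) (qline : Option Int) : List String :=
  match cs with
  | [] => pvFinB quote qline
  | c :: rest =>
    if c = '\n' then pvLoopB rest (line + 1) quote qline
    else match quote with
      | some q =>
        if c = q ∧ rest.head? = some q then pvLoopB rest.tail line quote qline
        else if c = q then pvLoopB rest line none none
        else pvLoopB rest line quote qline
      | none =>
        if c = '!' ∧ rest.head? = some '!' then
          -- j = text.find("\n", i+2); i = n if j < 0 else j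
          pvLoopB (rest.tail.dropWhile (· ≠ '\n')) line quote qline
        else if c = '{' ∧ rest.head? = some '!' then
          -- j = text.find("!}", i+2)
          match hfb : pvFindBlockEnd rest.tail with
          | none => pvMsgBlock line :: pvFinB none qline   -- unclosed: append msg, i = n
          | some (pre, suf) => pvLoopB suf (line + (pre.count '\n' : Int)) quote qline
        else if c = '\'' ∨ c = '"' then pvLoopB rest line (some c) (some line)
        else pvLoopB rest line quote qline
  termination_by cs.length
  decreasing_by
    all_goals simp [List.length_tail]
    · have h1 := List.length_dropWhile_le (fun x => !decide (x = '\n')) rest.tail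
      have h2 : rest.tail.length ≤ rest.length := by simp [List.length_tail]
      omega
    · have h1 := pvFindBlockEnd_len rest.tail pre suf hfb
      have h2 : rest.tail.length ≤ rest.length := by simp [List.length_tail]
      omega

def scan_code_health_py_alt (text : String) : List String :=
  pvLoopB text.toList 1 none none

-- ===== PRECONDITION & SPEC =====
def Spec_scan_code_health_py (text : String) (out : List String) : Prop := out = scan_code_health_py_alt text
instance (text : String) (out : List String) : Decidable (Spec_scan_code_health_py text out) := by unfold Spec_scan_code_health_py; infer_instance

-- ===== CLAIM (what is proved, stated in full; the proofs are below) =====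
def Claim_equal_scan_code_health_py : Prop := ∀ (text : String), Dom_scan_code_health_py text → Spec_scan_code_health_py text (scan_code_health_py text)

-- ===== LEMMAS AND PROOFS =====

-- A inside a line comment skips to the next newline: what B's find-jump does in one step.
theorem pvLoopA_ilc (l : List Char) (line : Int) (qline : Option Int) :
    pvLoopA l line none qline true false none =
      (match l.dropWhile (· ≠ '\n') with
       | [] => []
       | _ :: r => pvLoopA r (line + 1) none qline false false none) := by
  induction l generalizing line with
  | nil => rw [pvLoopA.eq_def]; cases qline <;> rfl
  | cons c rest ih =>
    rw [pvLoopA.eq_def]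
    simp only []
    by_cases hc : c = '\n'
    · subst hc; simp
    · rw [ih line]
      simp [hc]

-- A inside a block comment skips to the closing "!}" (counting newlines): B's find-jump in one step.
theorem pvLoopA_ibc (n : Nat) : ∀ (l : List Char), l.length ≤ n → ∀ (line bl : Int) (qline : Option Int),
    pvLoopA l line none qline false true (some bl) =
      (match pvFindBlockEnd l with
       | none => [pvMsgBlock bl]
       | some (pre, suf) => pvLoopA suf (line + (pre.count '\n' : Int)) none qline false false none) := by
  induction n with
  | zero =>
    intro l hl line bl qline
    have hnil : l = [] := List.eq_nil_of_length_eq_zero (Nat.le_zero.mp hl)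
    subst hnil
    rw [pvLoopA.eq_def]; cases qline <;> rfl
  | succ m ih =>
    intro l hl line bl qline
    cases l with
    | nil => rw [pvLoopA.eq_def]; cases qline <;> rfl
    | cons c rest =>
      have hr : rest.length ≤ m := by simp at hl; omega
      rw [pvLoopA.eq_def]
      simp only []
      by_cases hc : c = '\n'
      · subst hc
        rw [ih rest hr (line + 1) bl qline]
        cases hfe : pvFindBlockEnd rest with
        | none => simp [pvFindBlockEnd, hfe]
        | some p =>
          simp [pvFindBlockEnd, hfe]
          congr 1
          ring
      · by_cases hcl : c = '!' ∧ rest.head? = some '}'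
        · simp [pvFindBlockEnd, hcl.1, hcl.2]
        · rw [ih rest hr line bl qline]
          cases hfe : pvFindBlockEnd rest with
          | none => simp [pvFindBlockEnd, hfe, hc, hcl]
          | some p => simp [pvFindBlockEnd, hfe, hc, hcl]

-- the main simulation: outside comments A's flag machine and B's jump machine agree
theorem pvLoop_main (n : Nat) : ∀ (cs : List Char), cs.length ≤ n → ∀ (line : Int) (quote : Option Char) (qline : Option Int),
    pvLoopA cs line quote qline false false none = pvLoopB cs line quote qline := by
  induction n with
  | zero =>
    intro cs hl line quote qline
    have hnil : cs = [] := List.eq_nil_of_length_eq_zero (Nat.le_zero.mp hl)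
    subst hnil
    rw [pvLoopA.eq_def, pvLoopB.eq_def]; cases quote <;> cases qline <;> rfl
  | succ m ih =>
    intro cs hl line quote qline
    cases cs with
    | nil => rw [pvLoopA.eq_def, pvLoopB.eq_def]; cases quote <;> cases qline <;> rfl
    | cons c rest =>
      have hr : rest.length ≤ m := by simp at hl; omega
      have hrt : rest.tail.length ≤ m := by
        have h := List.length_tail (l := rest); omega
      rw [pvLoopA.eq_def, pvLoopB.eq_def]
      simp only []
      by_cases hc : c = '\n'
      · subst hc
        simp [ih rest hr (line + 1) quote qline]
      · cases quote with
        | some q =>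
          by_cases h1 : c = q
          · subst h1
            by_cases h2 : rest.head? = some c
            · simp [hc, h2, ih rest.tail hrt line (some c) qline]
            · simp [hc, h2, ih rest hr line none none]
          · simp [hc, h1, ih rest hr line (some q) qline]
        | none =>
          by_cases hlc : c = '!' ∧ rest.head? = some '!'
          · obtain ⟨hlc1, hlc2⟩ := hlc
            subst hlc1
            rw [pvLoopA_ilc rest.tail line qline]
            cases hdw : rest.tail.dropWhile (· ≠ '\n') with
            | nil =>
              simp [hc, hlc2]
              rw [pvLoopB.eq_def]
              cases qline <;> rfl
            | cons a r =>
              have ha : a = '\n' := by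
                have hh := List.head?_dropWhile_not (p := fun x => decide (x ≠ '\n')) (l := rest.tail)
                rw [hdw] at hh; simp at hh; exact hh
              have hrl : r.length ≤ m := by
                have h1 := List.length_dropWhile_le (fun x => decide (x ≠ '\n')) rest.tail
                rw [hdw] at h1; simp at h1; omega
              subst ha
              simp [hc, hlc2]
              rw [pvLoopB.eq_def]
              simp [ih r hrl (line + 1) none qline]
          · by_cases hbc : c = '{' ∧ rest.head? = some '!'
            · obtain ⟨hbc1, hbc2⟩ := hbc
              subst hbc1
              rw [pvLoopA_ibc rest.tail.length rest.tail (le_refl _) line line qline]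
              cases hfe : pvFindBlockEnd rest.tail with
              | none =>
                simp [hc, hbc2]
                cases qline <;> rfl
              | some p =>
                have hsl : p.2.length ≤ m := le_trans (pvFindBlockEnd_len rest.tail p.1 p.2 hfe) hrt
                simp [hc, hbc2, ih p.2 hsl (line + (p.1.count '\n' : Int)) none qline]
            · by_cases hq : c = '\'' ∨ c = '"'
              · simp [hc, hlc, hbc, hq, ih rest hr line (some c) (some line)]
              · simp [hc, hlc, hbc, hq, ih rest hr line none qline]

-- ===== VERDICT (by name: the statement is the Claim_ definition above) =====
theorem scan_code_health_py_spec : Claim_equal_scan_code_health_py := by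
  intro text _hdom
  show scan_code_health_py text = scan_code_health_py_alt text
  unfold scan_code_health_py scan_code_health_py_alt
  exact pvLoop_main text.toList.length text.toList (le_refl _) 1 none none
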